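-- pv_equiv track=rewrite | github.com/ntrutuo1/VulnMngSys | vulnmngsys_app/modules.py | _extract_last_directive_value
-- ===== SOURCE A (Python) =====
-- def _extract_last_directive_value(raw_text: str, directive: str) -> str | None:
--     matched_value: str | None = None
--     lookup = directive.lower()
--     for line in raw_text.splitlines():
--         stripped = line.strip()
--         if not stripped or stripped.startswith("#"):
--             continue
--         content = stripped.split("#", 1)[0].strip()
--         if not content:
--             continue
--         parts = content.split()
--         if not parts:
--             continue
--         key = parts[0].lower()
--         if key == lookup:
--             matched_value = " ".join(parts[1:]).strip()
--     return matched_value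
-- ===== SOURCE B (Python) =====
-- def _extract_last_directive_value(raw_text: str, directive: str):
--     lookup = directive.lower()
--     for line in reversed(raw_text.splitlines()):
--         # cutting at the first '#' and whitespace-splitting subsumes all of A's
--         # strip / comment-prefix / empty-content checks
--         parts = line.split("#", 1)[0].split()
--         if parts and parts[0].lower() == lookup:
--             return " ".join(parts[1:])
--     return None
-- ===== Notes on version B (the rewrite author's own statement) =====
-- stated objective: simpler
-- what changed: B scans the lines in reverse and returns on the first match, and collapses A's strip/comment-prefix/empty-content checks and value re-strip into a single cut-at-'#' plus whitespace-split per line.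
import Mathlib
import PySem

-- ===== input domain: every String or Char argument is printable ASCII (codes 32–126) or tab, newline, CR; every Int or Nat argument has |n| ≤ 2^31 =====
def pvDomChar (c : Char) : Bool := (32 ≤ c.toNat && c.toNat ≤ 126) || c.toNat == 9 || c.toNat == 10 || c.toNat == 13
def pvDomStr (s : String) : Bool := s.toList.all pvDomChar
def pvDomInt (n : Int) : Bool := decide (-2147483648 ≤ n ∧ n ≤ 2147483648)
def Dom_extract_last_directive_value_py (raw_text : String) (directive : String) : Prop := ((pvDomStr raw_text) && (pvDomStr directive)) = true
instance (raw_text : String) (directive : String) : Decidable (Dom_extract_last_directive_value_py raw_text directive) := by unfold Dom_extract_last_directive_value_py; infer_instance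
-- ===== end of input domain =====

-- B scans the lines in reverse returning on the first match, and collapses A's strip/comment-prefix/empty-content
-- checks and value re-strip into a single cut-at-'#'-then-whitespace-split per line; objective: simpler.


-- ===== PORT A =====
-- literal transliteration of A: fold over the lines keeping the value of the last matching line
def extract_last_directive_value_py (raw_text : String) (directive : String) : Option String :=
  let lookup := PySem.Str.lower directive
  (PySem.Str.splitlines raw_text).foldl (fun matched_value line =>
    let stripped := PySem.Str.strip line
    if stripped = "" || PySem.Str.startswith stripped "#" then matched_value
    else
      -- stripped.split("#", 1)[0]: sep ≠ "" so splitMax? is some, and the result is nonempty so [0] is the head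
      let content := PySem.Str.strip (((PySem.Str.splitMax? stripped "#" 1).getD []).headD "")
      if content = "" then matched_value
      else
        match PySem.Str.split₀ content with
        | [] => matched_value
        | p0 :: rest =>
          if PySem.Str.lower p0 = lookup then some (PySem.Str.strip (PySem.Str.join " " rest))
          else matched_value) none

-- ===== PORT B =====
-- Source B: reversed lines, first hit wins; per line: parts = line.split("#", 1)[0].split()
-- ("#" ≠ "" so splitMax? is some; str.split with a separator never returns [], so [0] is the head)
def extract_last_directive_value_py_alt (raw_text : String) (directive : String) : Option String :=
  let lookup := PySem.Str.lower directive
  ((PySem.Str.splitlines raw_text).reverse).findSome? (fun line =>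
    match PySem.Str.split₀ (((PySem.Str.splitMax? line "#" 1).getD []).headD "") with
    | p0 :: rest => if PySem.Str.lower p0 = lookup then some (PySem.Str.join " " rest) else none
    | [] => none)

-- ===== PRECONDITION & SPEC =====
def Spec_extract_last_directive_value_py (raw_text : String) (directive : String) (out : Option String) : Prop := out = extract_last_directive_value_py_alt raw_text directive
instance (raw_text : String) (directive : String) (out : Option String) : Decidable (Spec_extract_last_directive_value_py raw_text directive out) := by unfold Spec_extract_last_directive_value_py; infer_instance

-- ===== CLAIM (what is proved, stated in full; the proofs are below) =====
def Claim_equal_extract_last_directive_value_py : Prop := ∀ (raw_text : String) (directive : String), Dom_extract_last_directive_value_py raw_text directive → Spec_extract_last_directive_value_py raw_text directive (extract_last_directive_value_py raw_text directive)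

-- ===== LEMMAS AND PROOFS =====

-- abbreviations used by the proofs only
def pvWs : Char → Bool := PySem.Chars.isspace
def pvT (l : List Char) : List Char := l.takeWhile (fun c => c != '#')
-- B's per-line parse as a named function (definitionally the lambda inside the B port)
def pvParse (line : String) (lookup : String) : Option String :=
  match PySem.Str.split₀ (((PySem.Str.splitMax? line "#" 1).getD []).headD "") with
  | p0 :: rest => if PySem.Str.lower p0 = lookup then some (PySem.Str.join " " rest) else none
  | [] => none

-- ---- splitOnMax with sep "#" and maxsplit 1: the first piece is takeWhile (· ≠ '#') ----
theorem pv_go0 (fuel : Nat) (l cur : List Char) (acc : List (List Char)) :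
    PySem.Chars.splitOnMax.go ['#'] fuel 0 l cur acc = ((cur.reverse ++ l) :: acc).reverse := by
  cases fuel <;> cases l <;> simp [PySem.Chars.splitOnMax.go]

theorem pv_go1_head (fuel : Nat) (l cur : List Char) (h : l.length < fuel) :
    (PySem.Chars.splitOnMax.go ['#'] fuel 1 l cur []).headD [] = cur.reverse ++ pvT l := by
  induction fuel generalizing l cur with
  | zero => omega
  | succ fuel ih =>
    cases l with
    | nil => simp [PySem.Chars.splitOnMax.go, pvT]
    | cons c rest =>
      rw [PySem.Chars.splitOnMax.go]
      by_cases hc : c = '#'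
      · subst hc
        simp [pv_go0, pvT, List.takeWhile_cons_of_neg (p := fun x => x != '#') (a := '#') (by simp)]
      · have hpre : (['#'].isPrefixOf (c :: rest)) = false := by
          simp [List.isPrefixOf]; exact fun h => absurd h.symm hc
        simp only [if_neg (by norm_num : ¬(1 = 0)), hpre, Bool.false_eq_true, if_false]
        rw [ih rest (c :: cur) (by simpa using Nat.lt_of_succ_lt_succ h)]
        simp [pvT, List.takeWhile_cons_of_pos (p := fun x => x != '#') (by simpa using hc)]

theorem pv_head_splitOnMax (l : List Char) :
    (PySem.Chars.splitOnMax l ['#'] 1).headD [] = pvT l := by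
  unfold PySem.Chars.splitOnMax
  rw [if_neg (by norm_num)]
  simpa using pv_go1_head (l.length + 1) l [] (by omega)

-- ---- split₀ ignores outer whitespace ----
theorem pv_split0_go_lstrip (l : List Char) (acc : List (List Char)) :
    PySem.Chars.split₀.go (l.dropWhile pvWs) [] acc = PySem.Chars.split₀.go l [] acc := by
  induction l with
  | nil => rfl
  | cons c rest ih =>
    by_cases hc : PySem.Chars.isspace c = true
    · rw [List.dropWhile_cons_of_pos (p := pvWs) hc, ih]
      conv_rhs => rw [PySem.Chars.split₀.go]
      simp [hc]
    · rw [List.dropWhile_cons_of_neg (p := pvWs) hc]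

theorem pv_split0_lstrip (l : List Char) :
    PySem.Chars.split₀ (PySem.Chars.lstrip l) = PySem.Chars.split₀ l := by
  unfold PySem.Chars.split₀ PySem.Chars.lstrip
  exact pv_split0_go_lstrip l []

theorem pv_split0_go_allws (sp : List Char) (hsp : ∀ c ∈ sp, pvWs c = true) (cur : List Char)
    (acc : List (List Char)) :
    PySem.Chars.split₀.go sp cur acc = PySem.Chars.split₀.go [] cur acc := by
  induction sp generalizing cur acc with
  | nil => rfl
  | cons c rest ih =>
    have hc : PySem.Chars.isspace c = true := hsp c (by simp)
    have hrest : ∀ c ∈ rest, pvWs c = true := fun c hcm => hsp c (by simp [hcm])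
    conv_lhs => rw [PySem.Chars.split₀.go]
    simp only [hc, if_true]
    by_cases hcur : cur.isEmpty
    · simp only [hcur, if_true]
      rw [ih hrest [] acc]
      rw [PySem.Chars.split₀.go, PySem.Chars.split₀.go]
      simp [List.isEmpty_iff.mp hcur]
    · simp only [hcur, Bool.false_eq_true, if_false]
      rw [ih hrest [] (cur.reverse :: acc)]
      rw [PySem.Chars.split₀.go, PySem.Chars.split₀.go]
      simp [hcur]

theorem pv_split0_go_append_ws (l sp : List Char) (hsp : ∀ c ∈ sp, pvWs c = true)
    (cur : List Char) (acc : List (List Char)) :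
    PySem.Chars.split₀.go (l ++ sp) cur acc = PySem.Chars.split₀.go l cur acc := by
  induction l generalizing cur acc with
  | nil => simpa using pv_split0_go_allws sp hsp cur acc
  | cons c rest ih =>
    rw [List.cons_append, PySem.Chars.split₀.go, PySem.Chars.split₀.go]
    by_cases hc : PySem.Chars.isspace c = true
    · simp only [hc, if_true]
      by_cases hcur : cur.isEmpty <;> simp [hcur, ih]
    · simp only [eq_false_of_ne_true hc]
      simp [ih]

theorem pv_rstrip_decomp (l : List Char) :
    l = PySem.Chars.rstrip l ++ (l.reverse.takeWhile pvWs).reverse := by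
  unfold PySem.Chars.rstrip pvWs
  conv_lhs => rw [← l.reverse_reverse,
    ← List.takeWhile_append_dropWhile (p := PySem.Chars.isspace) (l := l.reverse),
    List.reverse_append]

theorem pv_split0_rstrip (l : List Char) :
    PySem.Chars.split₀ (PySem.Chars.rstrip l) = PySem.Chars.split₀ l := by
  conv_rhs => rw [pv_rstrip_decomp l]
  unfold PySem.Chars.split₀
  exact (pv_split0_go_append_ws _ _ (fun c hc => List.mem_takeWhile_imp (by simpa using hc)) [] []).symm

theorem pv_split0_strip (l : List Char) :
    PySem.Chars.split₀ (PySem.Chars.strip l) = PySem.Chars.split₀ l := by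
  unfold PySem.Chars.strip
  rw [pv_split0_rstrip, pv_split0_lstrip]

-- ---- takeWhile (· ≠ '#') against strip ----
theorem pv_ws_ne_hash (c : Char) (h : pvWs c = true) : (c != '#') = true := by
  by_cases hc : c = '#'
  · subst hc; exact absurd h (by decide)
  · simpa using hc

theorem pv_takeWhile_lstrip (l : List Char) :
    pvT (PySem.Chars.lstrip l) = PySem.Chars.lstrip (pvT l) := by
  unfold PySem.Chars.lstrip pvT
  induction l with
  | nil => rfl
  | cons c rest ih =>
    by_cases hc : PySem.Chars.isspace c = true
    · rw [List.dropWhile_cons_of_pos hc,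
        List.takeWhile_cons_of_pos (p := fun x => x != '#') (pv_ws_ne_hash c hc),
        List.dropWhile_cons_of_pos hc]
      exact ih
    · rw [List.dropWhile_cons_of_neg hc]
      by_cases h2 : (c != '#') = true
      · rw [List.takeWhile_cons_of_pos (p := fun x => x != '#') h2,
          List.dropWhile_cons_of_neg hc]
      · rw [List.takeWhile_cons_of_neg (p := fun x => x != '#') h2]
        rfl

theorem pv_rstrip_append_cons (a b : List Char) (c : Char) (hc : pvWs c = false) :
    PySem.Chars.rstrip (a ++ c :: b) = a ++ c :: PySem.Chars.rstrip b := by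
  have hc' : PySem.Chars.isspace c = false := hc
  unfold PySem.Chars.rstrip
  rw [show (a ++ c :: b).reverse = b.reverse ++ (c :: a.reverse) by simp, List.dropWhile_append]
  by_cases h : (b.reverse.dropWhile PySem.Chars.isspace).isEmpty <;>
    simp_all

theorem pv_takeWhile_hash (a z : List Char) (ha : ∀ c ∈ a, (c != '#') = true) :
    (a ++ '#' :: z).takeWhile (fun c => c != '#') = a := by
  induction a with
  | nil => simp
  | cons d t ih =>
    rw [List.cons_append,
      List.takeWhile_cons_of_pos (p := fun c => c != '#') (ha d (by simp)),
      ih (fun c hc => ha c (by simp [hc]))]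

theorem pv_takeWhile_rstrip_of_mem (x : List Char) (h : '#' ∈ x) :
    pvT (PySem.Chars.rstrip x) = pvT x := by
  have hdw : x.dropWhile (fun c => c != '#') ≠ [] := by
    intro hnil
    have := List.dropWhile_eq_nil_iff.mp hnil '#' h
    simp at this
  have hhead : ((x.dropWhile (fun c => c != '#')).head hdw) = '#' := by
    have := List.head_dropWhile_not (fun c => c != '#') hdw
    simpa using this
  obtain ⟨b, hb⟩ : ∃ b, x = pvT x ++ '#' :: b := by
    refine ⟨(x.dropWhile (fun c => c != '#')).tail, ?_⟩
    conv_lhs => rw [← List.takeWhile_append_dropWhile (p := fun c => c != '#') (l := x)]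
    rw [show pvT x = x.takeWhile (fun c => c != '#') from rfl]
    congr 1
    have h5 := List.cons_head_tail hdw
    rw [hhead] at h5
    exact h5.symm
  have hall : ∀ c ∈ pvT x, (c != '#') = true :=
    fun c hc => List.mem_takeWhile_imp (p := fun c => c != '#') hc
  rw [hb, pv_rstrip_append_cons _ _ _ (by decide)]
  show (pvT x ++ '#' :: PySem.Chars.rstrip b).takeWhile (fun c => c != '#') =
    (pvT x ++ '#' :: b).takeWhile (fun c => c != '#')
  rw [pv_takeWhile_hash _ _ hall, pv_takeWhile_hash _ _ hall]

theorem pv_hash_not_mem_of_not_mem_lstrip (l : List Char) (h : '#' ∉ PySem.Chars.lstrip l) :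
    '#' ∉ l := by
  intro hl
  apply h
  unfold PySem.Chars.lstrip
  rcases List.mem_append.mp
      (by rw [List.takeWhile_append_dropWhile (p := pvWs)]; exact hl :
        '#' ∈ l.takeWhile pvWs ++ l.dropWhile pvWs) with h1 | h2
  · exact absurd (List.mem_takeWhile_imp h1) (by decide)
  · simpa [pvWs] using h2

theorem pv_mem_rstrip (x : List Char) (c : Char) (h : c ∈ PySem.Chars.rstrip x) : c ∈ x := by
  unfold PySem.Chars.rstrip at h
  have := List.mem_reverse.mp h
  exact List.mem_reverse.mp ((List.dropWhile_sublist _).mem this)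

-- the central "parts" equation: A's thrice-stripped parsing yields the same tokens as B's
theorem pv_parts_eq (l : List Char) :
    PySem.Chars.split₀ (PySem.Chars.strip (pvT (PySem.Chars.strip l))) =
      PySem.Chars.split₀ (pvT l) := by
  by_cases h : '#' ∈ PySem.Chars.lstrip l
  · have h1 : pvT (PySem.Chars.strip l) = PySem.Chars.lstrip (pvT l) := by
      unfold PySem.Chars.strip
      rw [pv_takeWhile_rstrip_of_mem _ h, pv_takeWhile_lstrip]
    rw [h1, pv_split0_strip, pv_split0_lstrip]
  · have hnl : '#' ∉ l := pv_hash_not_mem_of_not_mem_lstrip l h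
    have h2 : pvT (PySem.Chars.strip l) = PySem.Chars.strip l := by
      apply List.takeWhile_eq_self_iff.mpr
      intro c hc
      have : c ∈ l := by
        unfold PySem.Chars.strip at hc
        exact (List.dropWhile_sublist _).mem (pv_mem_rstrip _ _ hc)
      simp only [bne_iff_ne, ne_eq]
      rintro rfl; exact hnl this
    have h3 : pvT l = l := List.takeWhile_eq_self_iff.mpr (by
      intro c hc
      simp only [bne_iff_ne, ne_eq]
      rintro rfl; exact hnl hc)
    rw [h2, h3, pv_split0_strip, pv_split0_strip]

-- ---- skip-case lemmas: each of A's guards forces B's token list to be empty ----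
theorem pv_allws_split0 (m : List Char) (h : ∀ c ∈ m, pvWs c = true) :
    PySem.Chars.split₀ m = [] := by
  unfold PySem.Chars.split₀
  rw [pv_split0_go_allws m h [] []]
  rfl

theorem pv_strip_nil_allws (l : List Char) (h : PySem.Chars.strip l = []) :
    ∀ c ∈ l, pvWs c = true := by
  unfold PySem.Chars.strip PySem.Chars.rstrip PySem.Chars.lstrip at h
  have h1 : ∀ c ∈ (l.dropWhile PySem.Chars.isspace).reverse, PySem.Chars.isspace c = true := by
    rw [← List.dropWhile_eq_nil_iff (p := PySem.Chars.isspace)]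
    simpa [List.reverse_eq_nil_iff] using congrArg List.reverse h
  have h2 : l.dropWhile PySem.Chars.isspace = [] := by
    cases hd : l.dropWhile PySem.Chars.isspace with
    | nil => rfl
    | cons c rest =>
      have := List.head_dropWhile_not PySem.Chars.isspace (l := l) (by simp [hd])
      have hmem : c ∈ (l.dropWhile PySem.Chars.isspace).reverse := by simp [hd]
      simp [hd] at this
      exact absurd (h1 c hmem) (by simp [this])
  intro c hc
  exact List.dropWhile_eq_nil_iff.mp h2 c hc

theorem pv_rstrip_prefix (x : List Char) : PySem.Chars.rstrip x <+: x :=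
  ⟨(x.reverse.takeWhile pvWs).reverse, (pv_rstrip_decomp x).symm⟩

theorem pv_guard2_split0 (l : List Char) (z : List Char)
    (h : PySem.Chars.strip l = '#' :: z) : PySem.Chars.split₀ (pvT l) = [] := by
  have hpre : PySem.Chars.strip l <+: PySem.Chars.lstrip l := pv_rstrip_prefix _
  obtain ⟨w, hw⟩ := hpre
  rw [h] at hw
  have h1 : PySem.Chars.lstrip (pvT l) = pvT (PySem.Chars.lstrip l) := (pv_takeWhile_lstrip l).symm
  rw [← pv_split0_lstrip, h1, ← hw]
  simp [pvT, List.takeWhile_cons_of_neg (p := fun c => c != '#') (by simp : ¬('#' != '#') = true)]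
  rfl

-- ---- tokens of split₀ are nonempty and whitespace-free; joining them needs no strip ----
theorem pv_split0_go_inv (l cur : List Char) (acc : List (List Char))
    (hacc : ∀ p ∈ acc, p ≠ [] ∧ ∀ c ∈ p, pvWs c = false)
    (hcur : ∀ c ∈ cur, pvWs c = false) :
    ∀ p ∈ PySem.Chars.split₀.go l cur acc, p ≠ [] ∧ ∀ c ∈ p, pvWs c = false := by
  induction l generalizing cur acc with
  | nil =>
    intro p hp
    rw [PySem.Chars.split₀.go] at hp
    by_cases hcurE : cur.isEmpty
    · simp [hcurE] at hp
      exact hacc p (by simpa using hp)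
    · simp [hcurE] at hp
      rcases hp with hp | hp
      · exact hacc p (by simpa using hp)
      · subst hp
        constructor
        · simpa [List.isEmpty_iff] using hcurE
        · intro c hc; exact hcur c (by simpa using hc)
  | cons c rest ih =>
    intro p hp
    rw [PySem.Chars.split₀.go] at hp
    by_cases hc : PySem.Chars.isspace c = true
    · simp only [hc, if_true] at hp
      by_cases hcurE : cur.isEmpty
      · simp only [hcurE, if_true] at hp
        exact ih [] acc hacc (by simp) p hp
      · simp only [hcurE] at hp
        refine ih [] (cur.reverse :: acc) ?_ (by simp) p hp
        intro q hq
        rcases List.mem_cons.mp hq with hq | hq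
        · subst hq
          exact ⟨by simpa [List.isEmpty_iff] using hcurE, fun d hd => hcur d (by simpa using hd)⟩
        · exact hacc q hq
    · simp only [eq_false_of_ne_true hc] at hp
      refine ih (c :: cur) acc hacc ?_ p hp
      intro d hd
      rcases List.mem_cons.mp hd with hd | hd
      · subst hd; simpa [pvWs] using hc
      · exact hcur d hd

theorem pv_split0_tokens (l : List Char) (p : List Char) (hp : p ∈ PySem.Chars.split₀ l) :
    p ≠ [] ∧ ∀ c ∈ p, pvWs c = false :=
  pv_split0_go_inv l [] [] (by simp) (by simp) p hp

theorem pv_strip_eq_self (x : List Char)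
    (h1 : ∀ c, x.head? = some c → pvWs c = false)
    (h2 : ∀ c, x.getLast? = some c → pvWs c = false) :
    PySem.Chars.strip x = x := by
  unfold PySem.Chars.strip PySem.Chars.lstrip PySem.Chars.rstrip
  have hl : x.dropWhile PySem.Chars.isspace = x := by
    cases x with
    | nil => rfl
    | cons a t =>
      exact List.dropWhile_cons_of_neg
        (by simp [show PySem.Chars.isspace a = false from h1 a (by simp)])
  rw [hl]
  cases hx : x.reverse with
  | nil => simp [List.reverse_eq_nil_iff] at hx; simp [hx]
  | cons b r =>
    have hb : x.getLast? = some b := by rw [← List.head?_reverse, hx]; rfl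
    rw [List.dropWhile_cons_of_neg
      (by simp [show PySem.Chars.isspace b = false from h2 b hb]), ← hx, List.reverse_reverse]

theorem pv_join_ne_nil (p : List Char) (ps : List (List Char)) (hp : p ≠ []) :
    PySem.Chars.join [' '] (p :: ps) ≠ [] := by
  cases ps with
  | nil => simpa [PySem.Chars.join_singleton] using hp
  | cons q qs =>
    rw [PySem.Chars.join_cons_cons]
    simp [hp]

theorem pv_join_head? (p : List Char) (ps : List (List Char)) (hp : p ≠ []) (c : Char)
    (hc : (PySem.Chars.join [' '] (p :: ps)).head? = some c) : c ∈ p := by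
  cases ps with
  | nil =>
    rw [PySem.Chars.join_singleton] at hc
    exact List.mem_of_mem_head? hc
  | cons q qs =>
    rw [PySem.Chars.join_cons_cons] at hc
    cases p with
    | nil => exact absurd rfl hp
    | cons a t =>
      simp at hc
      simp [hc]

theorem pv_join_getLast? (ps : List (List Char)) (hps : ∀ p ∈ ps, p ≠ []) (c : Char)
    (hc : (PySem.Chars.join [' '] ps).getLast? = some c) : ∃ p ∈ ps, c ∈ p := by
  induction ps with
  | nil => simp [PySem.Chars.join_nil] at hc
  | cons p qs ih =>
    cases qs with
    | nil =>
      rw [PySem.Chars.join_singleton] at hc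
      exact ⟨p, by simp, List.mem_of_mem_getLast? hc⟩
    | cons q rs =>
      rw [PySem.Chars.join_cons_cons, List.getLast?_append] at hc
      cases hj : (PySem.Chars.join [' '] (q :: rs)).getLast? with
      | none =>
        rw [List.getLast?_eq_none_iff] at hj
        exact absurd hj (pv_join_ne_nil q rs (hps q (by simp)))
      | some d =>
        rw [hj] at hc
        simp at hc
        subst hc
        obtain ⟨r, hr, hcr⟩ := ih (fun x hx => hps x (by simp [hx])) hj
        exact ⟨r, by simp [hr], hcr⟩

theorem pv_strip_join (ps : List (List Char))
    (h : ∀ p ∈ ps, p ≠ [] ∧ ∀ c ∈ p, pvWs c = false) :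
    PySem.Chars.strip (PySem.Chars.join [' '] ps) = PySem.Chars.join [' '] ps := by
  cases ps with
  | nil => rw [PySem.Chars.join_nil]; rfl
  | cons p qs =>
    apply pv_strip_eq_self
    · intro c hc
      exact (h p (by simp)).2 c (pv_join_head? p qs (h p (by simp)).1 c hc)
    · intro c hc
      obtain ⟨r, hr, hcr⟩ := pv_join_getLast? (p :: qs) (fun x hx => (h x hx).1) c hc
      exact (h r hr).2 c hcr

-- ---- String-level bridges ----
theorem pv_headD_map_ofList (xs : List (List Char)) :
    (xs.map String.ofList).headD "" = String.ofList (xs.headD []) := by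
  cases xs <;> rfl

-- the first piece of line.split("#", 1), as a string, for any s
theorem pv_piece_eq (s : String) :
    ((PySem.Str.splitMax? s "#" 1).getD []).headD "" = String.ofList (pvT s.toList) := by
  unfold PySem.Str.splitMax?
  rw [show ("#" : String).toList = ['#'] from rfl]
  unfold PySem.Chars.splitMax?
  simp only [List.isEmpty_cons, Bool.false_eq_true, if_false, Option.map_some, Option.getD_some]
  rw [pv_headD_map_ofList, pv_head_splitOnMax]

-- A's parts list = B's parts list, on Strings
theorem pv_parts_eq_str (line : String) :
    PySem.Str.split₀ (PySem.Str.strip (((PySem.Str.splitMax? (PySem.Str.strip line) "#" 1).getD []).headD "")) =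
      PySem.Str.split₀ (((PySem.Str.splitMax? line "#" 1).getD []).headD "") := by
  rw [pv_piece_eq, pv_piece_eq]
  unfold PySem.Str.strip PySem.Str.split₀
  simp only [String.toList_ofList]
  rw [pv_parts_eq]

theorem pv_split0_ofList (cs : List Char) :
    PySem.Str.split₀ (String.ofList cs) = (PySem.Chars.split₀ cs).map String.ofList := by
  unfold PySem.Str.split₀
  rw [String.toList_ofList]

theorem pv_toList_strip (line : String) :
    (PySem.Str.strip line).toList = PySem.Chars.strip line.toList := by
  unfold PySem.Str.strip
  rw [String.toList_ofList]

-- B's token list for a line, in terms of Chars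
theorem pv_parts_repr (line : String) :
    PySem.Str.split₀ (((PySem.Str.splitMax? line "#" 1).getD []).headD "") =
      (PySem.Chars.split₀ (pvT line.toList)).map String.ofList := by
  rw [pv_piece_eq, pv_split0_ofList]

theorem pv_map_toList_ofList (ts : List (List Char)) :
    (ts.map String.ofList).map String.toList = ts := by
  induction ts with
  | nil => rfl
  | cons t ts ih => simp [ih]

-- A's per-line body equals "update acc by pvParse"
theorem pv_body_eq (lookup : String) (acc : Option String) (line : String) :
    (let stripped := PySem.Str.strip line
     if stripped = "" || PySem.Str.startswith stripped "#" then acc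
     else
       let content := PySem.Str.strip (((PySem.Str.splitMax? stripped "#" 1).getD []).headD "")
       if content = "" then acc
       else
         match PySem.Str.split₀ content with
         | [] => acc
         | p0 :: rest =>
           if PySem.Str.lower p0 = lookup then some (PySem.Str.strip (PySem.Str.join " " rest))
           else acc)
    = (match pvParse line lookup with | some v => some v | none => acc) := by
  have hparts := pv_parts_repr line
  have hpartsA := pv_parts_eq_str line
  have hcontent :
      PySem.Str.strip (((PySem.Str.splitMax? (PySem.Str.strip line) "#" 1).getD []).headD "") =
        String.ofList (PySem.Chars.strip (pvT (PySem.Chars.strip line.toList))) := by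
    rw [pv_piece_eq (PySem.Str.strip line), pv_toList_strip]
    unfold PySem.Str.strip
    rw [String.toList_ofList]
  unfold pvParse
  by_cases g1 : PySem.Str.strip line = ""
  · have hz : PySem.Chars.split₀ (pvT line.toList) = [] := by
      apply pv_allws_split0
      intro c hc
      refine pv_strip_nil_allws line.toList ?_ c ((List.takeWhile_sublist _).mem hc)
      have := congrArg String.toList g1
      rwa [pv_toList_strip] at this
    rw [hparts, hz]
    dsimp only
    rw [show (decide (PySem.Str.strip line = "") || PySem.Str.startswith (PySem.Str.strip line) "#") = true by simp [g1]]
    simp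
  · by_cases g2 : PySem.Str.startswith (PySem.Str.strip line) "#" = true
    · have hpre : ('#' :: ([] : List Char)) <+: PySem.Chars.strip line.toList := by
        have := (PySem.Chars.startswith_iff _ _).mp (by rwa [PySem.Str.startswith, pv_toList_strip] at g2)
        simpa using this
      obtain ⟨w, hw⟩ := hpre
      have hz : PySem.Chars.split₀ (pvT line.toList) = [] :=
        pv_guard2_split0 line.toList w (by simpa using hw.symm)
      rw [hparts, hz]
      dsimp only
      rw [show (decide (PySem.Str.strip line = "") || PySem.Str.startswith (PySem.Str.strip line) "#") = true by rw [g2]; simp]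
      simp
    · have hcond : (decide (PySem.Str.strip line = "") || PySem.Str.startswith (PySem.Str.strip line) "#") = false := by
        simp only [Bool.or_eq_false_iff, decide_eq_false_iff_not]
        exact ⟨g1, eq_false_of_ne_true g2⟩
      by_cases g3 : PySem.Chars.strip (pvT (PySem.Chars.strip line.toList)) = []
      · have hz : PySem.Chars.split₀ (pvT line.toList) = [] := by
          rw [← pv_parts_eq line.toList, g3]
          rfl
        rw [hparts, hz]
        dsimp only
        rw [hcond, hcontent, g3]
        simp
      · have hcne : String.ofList (PySem.Chars.strip (pvT (PySem.Chars.strip line.toList))) ≠ "" := by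
          intro hcon
          exact g3 (by simpa using congrArg String.toList hcon)
        rw [hparts]
        dsimp only
        rw [hcond]
        simp only [Bool.false_eq_true, if_false]
        rw [hpartsA, hparts, hcontent, if_neg hcne]
        cases hsp : PySem.Chars.split₀ (pvT line.toList) with
        | nil => simp
        | cons t0 ts =>
          simp only [List.map_cons]
          by_cases hk : PySem.Str.lower (String.ofList t0) = lookup
          · simp only [hk]
            have htok : ∀ p ∈ ts, p ≠ [] ∧ ∀ c ∈ p, pvWs c = false := by
              intro p hp
              exact pv_split0_tokens (pvT line.toList) p (by rw [hsp]; exact List.mem_cons_of_mem _ hp)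
            have : PySem.Str.strip (PySem.Str.join " " (ts.map String.ofList)) =
                PySem.Str.join " " (ts.map String.ofList) := by
              unfold PySem.Str.join PySem.Str.strip
              rw [String.toList_ofList]
              rw [pv_map_toList_ofList ts]
              exact congrArg String.ofList (pv_strip_join ts htok)
            rw [this]
            simp
          · simp [hk]

-- keep-last fold = first success on the reversed list
theorem pv_foldl_eq_findSome (lookup : String) (xs : List String) (acc : Option String) :
    xs.foldl (fun a line => match pvParse line lookup with | some v => some v | none => a) acc
    = (match xs.reverse.findSome? (fun line => pvParse line lookup) with
       | some v => some v | none => acc) := by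
  induction xs generalizing acc with
  | nil => simp
  | cons x xs ih =>
    simp only [List.foldl_cons, List.reverse_cons, List.findSome?_append, ih]
    cases h : xs.reverse.findSome? (fun line => pvParse line lookup) with
    | some v => simp
    | none => cases h2 : pvParse x lookup <;> simp [h2]

-- ===== VERDICT (by name: the statement is the Claim_ definition above) =====
theorem extract_last_directive_value_py_spec : Claim_equal_extract_last_directive_value_py := by
  intro raw_text directive _
  unfold Spec_extract_last_directive_value_py extract_last_directive_value_py extract_last_directive_value_py_alt
  simp only [funext (fun a => funext (pv_body_eq (PySem.Str.lower directive) a))]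
  rw [pv_foldl_eq_findSome]
  have : (fun line => pvParse line (PySem.Str.lower directive)) =
      (fun line =>
        match PySem.Str.split₀ (((PySem.Str.splitMax? line "#" 1).getD []).headD "") with
        | p0 :: rest => if PySem.Str.lower p0 = PySem.Str.lower directive then
            some (PySem.Str.join " " rest) else none
        | [] => none) := rfl
  rw [this]
  cases h : (PySem.Str.splitlines raw_text).reverse.findSome?
      (fun line =>
        match PySem.Str.split₀ (((PySem.Str.splitMax? line "#" 1).getD []).headD "") with
        | p0 :: rest => if PySem.Str.lower p0 = PySem.Str.lower directive then
            some (PySem.Str.join " " rest) else none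
        | [] => none) <;> simp
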